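-- pv_equiv track=rewrite | github.com/LibenHailu/interview-prep | contest/a2svians/B_Hiding_From_Yisehak.py | solution
-- ===== SOURCE A (Python) =====
-- def solution(heights):
--     res = 0
--     stack = []
--
--     for height in heights:
--         if not stack:
--             stack.append(height)
--
--         else:
--             while stack and height > stack[-1]:
--                 res += 1
--                 stack.pop()
--             stack.append(height)
--
--     return res
-- ===== SOURCE B (Python) =====
-- def solution(heights):
--     res = 0
--     max_right = None
--     for height in reversed(heights):
--         if max_right is not None and max_right > height:
--             res += 1
--         if max_right is None or height > max_right:
--             max_right = height
--     return res
-- ===== Notes on version B (the rewrite author's own statement) =====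
-- stated objective: faster
-- what changed: Replaced the monotonic stack with a single reverse pass that tracks only the running suffix maximum: an element is popped exactly when some later element is strictly greater.
import Mathlib
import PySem

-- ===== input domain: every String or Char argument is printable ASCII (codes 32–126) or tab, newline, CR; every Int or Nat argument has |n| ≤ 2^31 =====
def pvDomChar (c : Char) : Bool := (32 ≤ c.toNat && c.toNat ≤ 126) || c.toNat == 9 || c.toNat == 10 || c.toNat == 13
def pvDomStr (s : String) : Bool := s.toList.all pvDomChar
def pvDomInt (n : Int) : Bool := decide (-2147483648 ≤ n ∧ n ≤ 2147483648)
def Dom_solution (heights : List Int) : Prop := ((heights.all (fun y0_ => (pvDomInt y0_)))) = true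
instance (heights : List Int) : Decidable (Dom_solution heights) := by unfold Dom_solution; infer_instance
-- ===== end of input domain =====

-- B replaces A's monotonic stack by a single reverse pass tracking only the suffix maximum
-- (O(1) extra space instead of a stack); same return value on every input.

-- ===== PORT A =====
-- the stack is represented with its TOP at the HEAD (Python's stack[-1] = head, pop = tail, append = cons)
-- the inner `while stack and height > stack[-1]: res += 1; stack.pop()` loop:
def popLoop (res : Int) (stack : List Int) (h : Int) : Int × List Int :=
  match stack with
  | [] => (res, [])
  | top :: rest => if top < h then popLoop (res + 1) rest h else (res, top :: rest)

-- one iteration of A's `for height in heights` loop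
def stepA (st : Int × List Int) (h : Int) : Int × List Int :=
  if st.2.isEmpty then (st.1, [h])
  else
    let p := popLoop st.1 st.2 h
    (p.1, h :: p.2)

def solution (heights : List Int) : Int :=
  (heights.foldl stepA (0, [])).1

-- ===== PORT B =====
-- one iteration of B's `for height in reversed(heights)` loop; foldr visits the last element first
def stepB (h : Int) (st : Int × Option Int) : Int × Option Int :=
  let res := if (match st.2 with | some m => decide (h < m) | none => false) then st.1 + 1 else st.1
  let mx := if (match st.2 with | none => true | some m => decide (m < h)) then some h else st.2
  (res, mx)

def solution_alt (heights : List Int) : Int :=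
  (heights.foldr stepB (0, none)).1

-- ===== PRECONDITION & SPEC =====
def Spec_solution (heights : List Int) (out : Int) : Prop := out = solution_alt heights
instance (heights : List Int) (out : Int) : Decidable (Spec_solution heights out) := by unfold Spec_solution; infer_instance

-- ===== CLAIM (what is proved, stated in full; the proofs are below) =====
def Claim_equal_solution : Prop := ∀ (heights : List Int), Dom_solution heights → Spec_solution heights (solution heights)

-- ===== LEMMAS AND PROOFS =====

-- On a stack sorted nondecreasing from the top, the pop loop removes exactly the elements < h.
theorem popLoop_spec (s : List Int) (r h : Int) (hs : s.Pairwise (· ≤ ·)) :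
    popLoop r s h = (r + s.countP (fun y => decide (y < h)), s.filter (fun y => !decide (y < h))) := by
  induction s generalizing r with
  | nil => simp [popLoop]
  | cons t rest ih =>
    rw [List.pairwise_cons] at hs
    by_cases hlt : t < h
    · rw [popLoop]
      simp only [hlt, if_pos, ih _ hs.2]
      simp [hlt, List.countP_cons]
      omega
    · rw [popLoop]
      have hall : ∀ y ∈ rest, ¬ (y < h) := fun y hy => by
        have := hs.1 y hy; omega
      have hcnt : rest.countP (fun y => decide (y < h)) = 0 := by
        rw [List.countP_eq_zero]; intro y hy; simpa using hall y hy
      have hfil : rest.filter (fun y => !decide (y < h)) = rest := by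
        rw [List.filter_eq_self]; intro y hy; simpa using hall y hy
      simp [hlt, List.countP_cons, hcnt, hfil]

theorem count_or (s : List Int) (p q : Int → Bool) :
    s.countP (fun y => p y || q y)
      = s.countP p + (s.filter (fun y => !p y)).countP q := by
  induction s with
  | nil => simp
  | cons t rest ih =>
    by_cases hp : p t = true
    · simp [List.countP_cons, hp, ih]; omega
    · have hp' : p t = false := by simpa using hp
      by_cases hq : q t = true
      · simp [List.countP_cons, hp', hq, ih]; omega
      · have hq' : q t = false := by simpa using hq
        simp [List.countP_cons, hp', hq', ih]

-- Main invariant: running A's loop from a sorted stack s adds, to the run from the empty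
-- stack, one pop for each stack element that some upcoming height strictly exceeds.
theorem stepA_main (hs : List Int) (r : Int) (s : List Int) (hsort : s.Pairwise (· ≤ ·)) :
    (hs.foldl stepA (r, s)).1
      = r + (hs.foldl stepA (0, [])).1
          + s.countP (fun y => hs.any (fun x => decide (y < x))) := by
  induction hs generalizing r s with
  | nil => simp
  | cons h t ih =>
    have hstep : stepA (r, s) h
        = (r + s.countP (fun y => decide (y < h)),
           h :: s.filter (fun y => !decide (y < h))) := by
      cases s with
      | nil => simp [stepA]
      | cons a s' => simp [stepA, popLoop_spec _ _ _ hsort]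
    have hfilge : ∀ y ∈ s.filter (fun y => !decide (y < h)), h ≤ y := by
      intro y hy
      have := List.of_mem_filter hy
      simp at this; omega
    have hsort' : (h :: s.filter (fun y => !decide (y < h))).Pairwise (· ≤ ·) :=
      List.pairwise_cons.2 ⟨hfilge, hsort.filter _⟩
    calc (List.foldl stepA (r, s) (h :: t)).1
        = (t.foldl stepA (stepA (r, s) h)).1 := by simp [List.foldl_cons]
      _ = (r + s.countP (fun y => decide (y < h)))
            + (t.foldl stepA (0, [])).1
            + (h :: s.filter (fun y => !decide (y < h))).countP
                (fun y => t.any (fun x => decide (y < x))) := by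
          rw [hstep, ih _ _ hsort']
      _ = r + (List.foldl stepA (0, []) (h :: t)).1
            + s.countP (fun y => (h :: t).any (fun x => decide (y < x))) := by
          have hsingle : (List.foldl stepA (0, []) (h :: t)).1
              = (t.foldl stepA (0, [])).1
                + (if t.any (fun x => decide (h < x)) then 1 else 0) := by
            have : List.foldl stepA ((0 : Int), ([] : List Int)) (h :: t)
                = t.foldl stepA (0, [h]) := by simp [List.foldl_cons, stepA]
            rw [this, ih _ _ (by simp)]
            simp [List.countP_cons]
          rw [hsingle]
          simp only [List.any_cons, List.countP_cons]
          rw [count_or]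
          push_cast
          split_ifs <;> omega

-- A's per-element recurrence.
theorem solution_cons (h : Int) (t : List Int) :
    solution (h :: t)
      = solution t + (if t.any (fun x => decide (h < x)) then 1 else 0) := by
  unfold solution
  have : List.foldl stepA ((0 : Int), ([] : List Int)) (h :: t)
      = t.foldl stepA (0, [h]) := by simp [List.foldl_cons, stepA]
  rw [this, stepA_main _ _ _ (by simp)]
  simp [List.countP_cons]

-- B's max accumulator strictly exceeds h exactly when some element of hs does.
theorem stepB_gtTest (hs : List Int) (h : Int) :
    (match (hs.foldr stepB (0, none)).2 with
     | some m => decide (h < m)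
     | none => false)
      = hs.any (fun x => decide (h < x)) := by
  induction hs with
  | nil => simp
  | cons x t ih =>
    have hx : (List.foldr stepB (0, none) (x :: t)).2
        = (if (match (t.foldr stepB (0, none)).2 with
               | none => true | some m => decide (m < x)) then some x
           else (t.foldr stepB (0, none)).2) := by
      simp [List.foldr_cons, stepB]
    rw [List.any_cons, hx]
    cases hmx : (t.foldr stepB (0, none)).2 with
    | none =>
      have ht : t.any (fun y => decide (h < y)) = false := by
        rw [← ih, hmx]
      simp [ht]
    | some m =>
      have ht : t.any (fun y => decide (h < y)) = decide (h < m) := by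
        rw [← ih, hmx]
      by_cases hc : m < x
      · simp [hmx, hc, ht]; omega
      · simp [hmx, hc, ht]; omega

-- B's per-element recurrence.
theorem solution_alt_cons (h : Int) (t : List Int) :
    solution_alt (h :: t)
      = solution_alt t + (if t.any (fun x => decide (h < x)) then 1 else 0) := by
  unfold solution_alt
  rw [List.foldr_cons]
  have := stepB_gtTest t h
  simp only [stepB, ← this]
  cases hmx : (t.foldr stepB (0, none)).2 <;> simp [hmx] <;> split_ifs <;> simp_all

-- ===== VERDICT (by name: the statement is the Claim_ definition above) =====
theorem solution_eq_alt (heights : List Int) : solution heights = solution_alt heights := by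
  induction heights with
  | nil => rfl
  | cons h t ih => rw [solution_cons, solution_alt_cons, ih]

theorem solution_spec : Claim_equal_solution := by
  intro heights _
  exact solution_eq_alt heights
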